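-- pv_equiv track=rewrite | github.com/alpine9000/geolith-libretro | scripts/resolve_profile.py | parse_by_line_func_addr
-- ===== SOURCE A (Python) =====
-- def parse_by_line_func_addr(lines):
--     entries = []
--     in_section = False
--     for ln in lines:
--         if ln.startswith('# by_line_func_addr:'):
--             in_section = True
--             continue
--         if in_section:
--             if ln.startswith('#') and 'by_' in ln:
--                 break
--             ln = ln.strip()
--             if not ln:
--                 continue
--             parts = ln.split(',')
--             if len(parts) < 4:
--                 continue
--             file_line = parts[0]
--             cycles = parts[1]
--             # Support both legacy (no count) and new (with count)
--             if parts[2].startswith('0x'):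
--                 addr = parts[2]
--                 count = ''
--             else:
--                 count = parts[2]
--                 addr = parts[3]
--             entries.append((file_line, cycles, addr, count))
--     return entries
-- ===== SOURCE B (Python) =====
-- # Mask/index/slice formulation: precompute a marker mask, locate the section by
-- # index arithmetic over the masks, cut two slices, and build the result with
-- # filter/map comprehensions -- no state flag, no break, no per-line loop control.
-- def parse_by_line_func_addr(lines):
--     lines = list(lines)
--     marker = [ln.startswith('# by_line_func_addr:') for ln in lines]
--     if True not in marker:
--         return []
--     start = marker.index(True) + 1
--     tail = lines[start:]
--     mtail = marker[start:]
--     term = [(not m) and ln.startswith('#') and 'by_' in ln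
--             for ln, m in zip(tail, mtail)]
--     end = term.index(True) if True in term else len(term)
--     rows = [ln.strip().split(',')
--             for ln, m in zip(tail[:end], mtail[:end]) if not m]
--     return [(p[0], p[1], p[2], '') if p[2].startswith('0x')
--             else (p[0], p[1], p[3], p[2])
--             for p in rows if len(p) >= 4]
-- ===== Notes on version B (the rewrite author's own statement) =====
-- stated objective: alternative
-- what changed: A's single stateful pass (in_section flag, continue/break) is replaced by a mask/index/slice formulation: precompute a boolean marker mask, locate the section start with .index(True), compute the section end by indexing a terminator mask, cut the two slices, and build the result with zip/filter/map comprehensions.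
import Mathlib
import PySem

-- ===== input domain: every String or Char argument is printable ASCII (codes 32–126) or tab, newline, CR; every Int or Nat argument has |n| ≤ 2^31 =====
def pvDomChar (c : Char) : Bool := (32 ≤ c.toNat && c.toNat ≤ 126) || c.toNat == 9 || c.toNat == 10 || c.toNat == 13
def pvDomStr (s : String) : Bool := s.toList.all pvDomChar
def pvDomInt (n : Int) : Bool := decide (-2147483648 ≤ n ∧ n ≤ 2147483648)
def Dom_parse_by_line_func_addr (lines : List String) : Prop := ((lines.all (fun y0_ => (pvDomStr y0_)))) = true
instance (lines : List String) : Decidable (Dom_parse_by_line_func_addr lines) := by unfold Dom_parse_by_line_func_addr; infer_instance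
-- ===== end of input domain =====

-- B replaces A's flag-driven single pass (with continue/break) by a mask/index/slice
-- formulation: precomputed boolean masks, index arithmetic, two slices and
-- zip/filter/map comprehensions (objective: alternative; same cost).

-- ===== PORT A =====
-- A: single flag-driven pass with break (for-loop with a break → structural recursion).
def pvAgo (inSection : Bool) : List String → List (String × String × String × String)
  | [] => []
  | ln :: rest =>
    if PySem.Str.startswith ln "# by_line_func_addr:" then
      pvAgo true rest
    else if inSection then
      if PySem.Str.startswith ln "#" && PySem.Str.isIn "by_" ln then
        []  -- break
      else
        let s := PySem.Str.strip ln
        if s == "" then pvAgo inSection rest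
        else
          let parts := (PySem.Str.split? s ",").getD []
          if parts.length < 4 then pvAgo inSection rest
          else
            let file_line := parts.getD 0 ""
            let cycles := parts.getD 1 ""
            if PySem.Str.startswith (parts.getD 2 "") "0x" then
              (file_line, cycles, parts.getD 2 "", "") :: pvAgo inSection rest
            else
              (file_line, cycles, parts.getD 3 "", parts.getD 2 "") :: pvAgo inSection rest
    else
      pvAgo inSection rest

def parse_by_line_func_addr (lines : List String) : List (String × String × String × String) :=
  pvAgo false lines

-- ===== PORT B =====
-- B-side helper: the conditional tuple of B's final comprehension.
def pvPick (p : List String) : String × String × String × String :=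
  if PySem.Str.startswith (p.getD 2 "") "0x" then
    (p.getD 0 "", p.getD 1 "", p.getD 2 "", "")
  else
    (p.getD 0 "", p.getD 1 "", p.getD 3 "", p.getD 2 "")

-- B: boolean marker mask; `True in`/`.index(True)` locate the section; the slices
-- `[start:]`/`[:end]` have nonnegative in-range bounds, so drop/take is exact;
-- zip/filter/map comprehensions build the result.
def parse_by_line_func_addr_alt (lines : List String) : List (String × String × String × String) :=
  let marker := lines.map (fun ln => PySem.Str.startswith ln "# by_line_func_addr:")
  if true ∈ marker then
    let start := marker.idxOf true + 1
    let tail := lines.drop start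
    let mtail := marker.drop start
    let term := (tail.zip mtail).map
      (fun lm => !lm.2 && (PySem.Str.startswith lm.1 "#" && PySem.Str.isIn "by_" lm.1))
    let e := if true ∈ term then term.idxOf true else term.length
    let rows := (((tail.take e).zip (mtail.take e)).filter (fun lm => !lm.2)).map
      (fun lm => (PySem.Str.split? (PySem.Str.strip lm.1) ",").getD [])
    (rows.filter (fun p => decide (4 ≤ p.length))).map pvPick
  else
    []

-- ===== PRECONDITION & SPEC =====
def Spec_parse_by_line_func_addr (lines : List String) (out : List (String × String × String × String)) : Prop := out = parse_by_line_func_addr_alt lines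
instance (lines : List String) (out : List (String × String × String × String)) : Decidable (Spec_parse_by_line_func_addr lines out) := by unfold Spec_parse_by_line_func_addr; infer_instance

-- ===== CLAIM (what is proved, stated in full; the proofs are below) =====
def Claim_equal_parse_by_line_func_addr : Prop := ∀ (lines : List String), Dom_parse_by_line_func_addr lines → Spec_parse_by_line_func_addr lines (parse_by_line_func_addr lines)

-- ===== LEMMAS AND PROOFS =====

-- abbreviations used only by the proofs
def pvMk (ln : String) : Bool := PySem.Str.startswith ln "# by_line_func_addr:"
def pvTm (ln : String) : Bool := !pvMk ln && (PySem.Str.startswith ln "#" && PySem.Str.isIn "by_" ln)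
def pvParts (ln : String) : List String := (PySem.Str.split? (PySem.Str.strip ln) ",").getD []

-- per-line parse as A performs it in the keep branch
def pvParseEntry (ln : String) : Option (String × String × String × String) :=
  if 4 ≤ (pvParts ln).length then some (pvPick (pvParts ln)) else none

-- B's section body, as a function of the tail slice alone
def pvSect (xs : List String) : List (String × String × String × String) :=
  let term := (xs.zip (xs.map pvMk)).map
    (fun lm => !lm.2 && (PySem.Str.startswith lm.1 "#" && PySem.Str.isIn "by_" lm.1))
  let e := if true ∈ term then term.idxOf true else term.length
  let rows := (((xs.take e).zip ((xs.map pvMk).take e)).filter (fun lm => !lm.2)).map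
    (fun lm => (PySem.Str.split? (PySem.Str.strip lm.1) ",").getD [])
  (rows.filter (fun p => decide (4 ≤ p.length))).map pvPick

-- the body A iterates over once in_section: skip markers, stop at a terminator
theorem pvAgo_true (xs : List String) :
    pvAgo true xs = ((xs.takeWhile (fun ln => !pvTm ln)).filter (fun ln => !pvMk ln)).filterMap pvParseEntry := by
  induction xs with
  | nil => rfl
  | cons ln rest ih =>
    by_cases h1 : pvMk ln = true
    · have ht : pvTm ln = false := by unfold pvTm; rw [h1, Bool.not_true, Bool.false_and]
      have h1'' : PySem.Str.startswith ln "# by_line_func_addr:" = true := h1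
      have hgo : pvAgo true (ln :: rest) = pvAgo true rest := by
        simp only [pvAgo, h1'', if_true]
      rw [hgo, ih, List.takeWhile_cons]
      simp only [ht, Bool.not_false, if_true, List.filter_cons, h1, Bool.not_true,
        Bool.false_eq_true, if_false]
    · have h1' : pvMk ln = false := by simpa using h1
      by_cases h2 : (PySem.Str.startswith ln "#" && PySem.Str.isIn "by_" ln) = true
      · have ht : pvTm ln = true := by unfold pvTm; rw [h1', h2]; rfl
        have h1'' : PySem.Str.startswith ln "# by_line_func_addr:" = false := h1'
        simp only [pvAgo, h1'', Bool.false_eq_true, if_false, h2, if_true]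
        simp [List.takeWhile_cons, ht]
      · have h2' : (PySem.Str.startswith ln "#" && PySem.Str.isIn "by_" ln) = false := by simpa using h2
        have ht : pvTm ln = false := by unfold pvTm; rw [h2', Bool.and_false]
        have hstep : pvAgo true (ln :: rest)
            = match pvParseEntry ln with
              | none => pvAgo true rest
              | some e => e :: pvAgo true rest := by
          have h1'' : PySem.Str.startswith ln "# by_line_func_addr:" = false := h1'
          simp only [pvAgo, h1'', Bool.false_eq_true, if_false, h2', if_true]
          by_cases hs : PySem.Str.strip ln = ""
          · have hp : pvParts ln = [""] := by
              simp [pvParts, hs]; rfl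
            have hpe : pvParseEntry ln = none := by simp [pvParseEntry, hp]
            simp [hs, hpe]
          · have hs' : (PySem.Str.strip ln == "") = false := by simpa using hs
            simp only [hs', Bool.false_eq_true, if_false]
            by_cases hl : ((PySem.Str.split? (PySem.Str.strip ln) ",").getD []).length < 4
            · have hpe : pvParseEntry ln = none := by
                simp only [pvParseEntry, pvParts]
                rw [if_neg]; omega
              simp [hl, hpe]
            · have h4 : 4 ≤ (pvParts ln).length := by simp only [pvParts]; omega
              have hpe : pvParseEntry ln = some (pvPick (pvParts ln)) := by
                simp [pvParseEntry, h4]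
              simp only [if_neg hl, hpe, pvPick, pvParts]
              split_ifs <;> rfl
        rw [hstep]
        have hb : (ln :: rest).takeWhile (fun l => !pvTm l) = ln :: rest.takeWhile (fun l => !pvTm l) := by
          simp [List.takeWhile_cons, ht]
        rw [hb]
        simp only [List.filter_cons, h1', Bool.not_false, if_true, List.filterMap_cons]
        cases hpe : pvParseEntry ln <;> simp [ih, hpe]

-- zip a list with a map of itself
theorem pvZipMapSelf {α β : Type} (xs : List α) (f : α → β) :
    xs.zip (xs.map f) = xs.map (fun x => (x, f x)) := by
  induction xs with
  | nil => rfl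
  | cons x xs ih => simp [ih]

-- take up to the first true of the mapped mask = takeWhile of the negation
theorem pvTakeIdxAux {α : Type} (xs : List α) (f : α → Bool) :
    xs.take ((xs.map f).idxOf true) = xs.takeWhile (fun x => !f x) := by
  induction xs with
  | nil => rfl
  | cons x xs ih =>
    by_cases h : f x = true
    · simp [h, List.takeWhile_cons]
    · have h' : f x = false := by simpa using h
      have hne : f x ≠ true := by simp [h']
      simp [List.map_cons, List.idxOf_cons_ne _ hne, List.takeWhile_cons, h', ih]

theorem pvTakeIdx {α : Type} (xs : List α) (f : α → Bool) :
    xs.take (if true ∈ xs.map f then (xs.map f).idxOf true else (xs.map f).length)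
      = xs.takeWhile (fun x => !f x) := by
  have hcollapse : (if true ∈ xs.map f then (xs.map f).idxOf true else (xs.map f).length)
      = (xs.map f).idxOf true := by
    by_cases hm : true ∈ xs.map f
    · rw [if_pos hm]
    · rw [if_neg hm, (List.idxOf_eq_length_iff.2 hm)]
  rw [hcollapse]
  exact pvTakeIdxAux xs f

-- the filterMap of per-line parses equals B's filter-then-map over the rows
theorem pvRows (ys : List String) :
    ys.filterMap pvParseEntry
      = ((ys.map pvParts).filter (fun p => decide (4 ≤ p.length))).map pvPick := by
  induction ys with
  | nil => rfl
  | cons y ys ih =>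
    rw [List.filterMap_cons, List.map_cons, List.filter_cons]
    by_cases h : 4 ≤ (pvParts y).length
    · have hy : pvParseEntry y = some (pvPick (pvParts y)) := by
        simp [pvParseEntry, h]
      rw [hy]
      simp [h, ih]
    · have hy : pvParseEntry y = none := by
        simp [pvParseEntry, h]
      rw [hy]
      simp [h, ih]

-- B's section body computes A's in-section pass
theorem pvSect_eq (xs : List String) : pvSect xs = pvAgo true xs := by
  have hco1 : ((fun lm : String × Bool => !lm.2 && (PySem.Str.startswith lm.1 "#" && PySem.Str.isIn "by_" lm.1)) ∘ fun x => (x, pvMk x)) = pvTm := by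
    funext x; rfl
  have hco2 : ((fun lm : String × Bool => (PySem.Str.split? (PySem.Str.strip lm.1) ",").getD []) ∘ fun x => (x, pvMk x)) = pvParts := by
    funext x; rfl
  have hco3 : ((fun lm : String × Bool => !lm.2) ∘ fun x => (x, pvMk x)) = fun x => !pvMk x := by
    funext x; rfl
  simp only [pvSect]
  rw [pvZipMapSelf, List.map_map, hco1, ← List.map_take, pvTakeIdx xs pvTm, pvZipMapSelf]
  have hfil : List.filter (fun lm => !lm.2)
        (List.map (fun x => (x, pvMk x)) (List.takeWhile (fun x => !pvTm x) xs))
      = List.map (fun x => (x, pvMk x)) (List.filter (fun x => !pvMk x) (List.takeWhile (fun x => !pvTm x) xs)) := by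
    rw [List.filter_map, hco3]
  rw [hfil, List.map_map, hco2, pvAgo_true, pvRows]

-- B as a locate-then-section computation
theorem pvAlt_eq (lines : List String) :
    parse_by_line_func_addr_alt lines
      = if true ∈ lines.map pvMk then pvSect (lines.drop ((lines.map pvMk).idxOf true + 1)) else [] := by
  have hmk : lines.map (fun ln => PySem.Str.startswith ln "# by_line_func_addr:") = lines.map pvMk := rfl
  simp only [parse_by_line_func_addr_alt, pvSect, hmk]
  by_cases hm : true ∈ lines.map pvMk
  · rw [if_pos hm, if_pos hm, ← List.map_drop]
  · rw [if_neg hm, if_neg hm]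

-- A's whole pass equals B
theorem pvMain (lines : List String) :
    pvAgo false lines = parse_by_line_func_addr_alt lines := by
  induction lines with
  | nil => rfl
  | cons ln rest ih =>
    rw [pvAlt_eq]
    by_cases h : pvMk ln = true
    · have h' : PySem.Str.startswith ln "# by_line_func_addr:" = true := h
      have hmem : true ∈ (ln :: rest).map pvMk := by simp [h]
      have hidx : ((ln :: rest).map pvMk).idxOf true = 0 := by
        simp [List.map_cons, h]
      simp only [pvAgo, h', hmem, if_pos, hidx]
      rw [pvSect_eq]
      simp
    · have h' : pvMk ln = false := by simpa using h
      have h'' : PySem.Str.startswith ln "# by_line_func_addr:" = false := h'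
      have hne : pvMk ln ≠ true := by simp [h']
      simp only [pvAgo, h'', Bool.false_eq_true, if_false]
      rw [ih, pvAlt_eq]
      have hmem : (true ∈ (ln :: rest).map pvMk) ↔ (true ∈ rest.map pvMk) := by
        simp [h']
      by_cases hm : true ∈ rest.map pvMk
      · rw [if_pos (hmem.mpr hm), if_pos hm]
        have hidx : ((ln :: rest).map pvMk).idxOf true = (rest.map pvMk).idxOf true + 1 := by
          simp [List.map_cons, List.idxOf_cons_ne _ hne]
        rw [hidx]
        rfl
      · rw [if_neg (fun hh => hm (hmem.mp hh)), if_neg hm]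

-- ===== VERDICT (by name: the statement is the Claim_ definition above) =====
theorem parse_by_line_func_addr_spec : Claim_equal_parse_by_line_func_addr := by
  intro lines _
  unfold Spec_parse_by_line_func_addr parse_by_line_func_addr
  exact pvMain lines
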